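-- pv_equiv track=rewrite | github.com/pangddu123/MODELNET_PN-main | utils.py | filter_prefixes
-- ===== SOURCE A (Python) =====
-- def filter_prefixes(data):
--     # 提取字符和权重
--     words = [item[0] for item in data]
--     prefix_words = set()  # 用于存储前缀字符
--     non_prefix_words = set()  # 用于存储非前缀但独立的字符
--
--     # 遍历每个字符，检查它是否是其他字符的前缀
--     for word in words:
--         is_prefix = any(other.startswith(word) for other in words if other != word)
--         if is_prefix:
--             prefix_words.add(word)  # 如果是前缀，则添加到前缀集合
--         else:
--             # 检查该字符是否是任何其他字符的前缀
--             is_prefix_of_any = any(word.startswith(other) for other in words if other != word)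
--             if not is_prefix_of_any:
--                 non_prefix_words.add(word)  # 如果不是任何字符的前缀，则添加到独立字符集合
--
--     # 生成结果，保留前缀字符和独立字符的信息
--     filtered_data = [item for item in data if item[0] in prefix_words or item[0] in non_prefix_words]
--
--     return filtered_data
-- ===== SOURCE B (Python) =====
-- def filter_prefixes(data):
--     # hash-set lookups: only prefix lengths that occur as word lengths can ever matter
--     wordset = {w for w, _ in data}
--     lengths = {len(u) for u in wordset}
--     proper_prefixes = {u[:k] for u in wordset for k in lengths if k < len(u)}
--     return [item for item in data
--             if item[0] in proper_prefixes
--             or all(item[0][:k] not in wordset for k in lengths if k < len(item[0]))]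
-- ===== Notes on version B (the rewrite author's own statement) =====
-- stated objective: faster
-- what changed: Replaces A's two per-word startswith scans over the whole word list by hash sets: the set of occurring word lengths and the set of proper prefixes of words at those lengths, so each word is classified by hash lookups instead of O(n) string scans.
import Mathlib
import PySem

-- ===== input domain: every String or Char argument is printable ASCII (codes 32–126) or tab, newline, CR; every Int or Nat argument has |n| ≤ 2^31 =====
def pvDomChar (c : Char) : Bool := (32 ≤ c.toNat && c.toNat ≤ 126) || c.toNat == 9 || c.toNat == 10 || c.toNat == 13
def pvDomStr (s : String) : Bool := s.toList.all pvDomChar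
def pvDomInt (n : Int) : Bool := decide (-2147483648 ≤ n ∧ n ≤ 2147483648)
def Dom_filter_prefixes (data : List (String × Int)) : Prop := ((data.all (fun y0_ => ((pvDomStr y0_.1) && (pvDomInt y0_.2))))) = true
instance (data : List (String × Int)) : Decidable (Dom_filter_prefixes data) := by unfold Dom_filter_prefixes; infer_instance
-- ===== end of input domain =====

-- B replaces A's per-word scans of the whole word list by hash sets: the set of
-- word lengths and the set of proper prefixes of words at those lengths (objective: faster).

-- ===== PORT A =====
def filter_prefixes (data : List (String × Int)) : List (String × Int) :=
  let words := data.map (fun item => item.1)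
  let sets := words.foldl
    (fun (st : PySem.Set String × PySem.Set String) word =>
      if words.any (fun other => other != word && PySem.Str.startswith other word) then
        (PySem.Set.add st.1 word, st.2)
      else if !(words.any (fun other => other != word && PySem.Str.startswith word other)) then
        (st.1, PySem.Set.add st.2 word)
      else st)
    (PySem.Set.empty, PySem.Set.empty)
  data.filter (fun item => PySem.Set.contains sets.1 item.1 || PySem.Set.contains sets.2 item.1)

-- ===== PORT B =====
def filter_prefixes_alt (data : List (String × Int)) : List (String × Int) :=
  let wordset : PySem.Set String := PySem.Set.ofList (data.map (fun item => item.1))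
  let lengths : PySem.Set Int :=
    wordset.foldl (fun s u => PySem.Set.add s (PySem.Str.len u)) PySem.Set.empty
  let properPrefixes : PySem.Set String :=
    wordset.foldl
      (fun s u =>
        lengths.foldl
          (fun s k =>
            if k < PySem.Str.len u then PySem.Set.add s (PySem.Str.slice u none (some k)) else s)
          s)
      PySem.Set.empty
  data.filter (fun item =>
    PySem.Set.contains properPrefixes item.1 ||
    lengths.all
      (fun k =>
        !(decide (k < PySem.Str.len item.1)) ||
        !(PySem.Set.contains wordset (PySem.Str.slice item.1 none (some k)))))

-- ===== PRECONDITION & SPEC =====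
def Spec_filter_prefixes (data : List (String × Int)) (out : List (String × Int)) : Prop := out = filter_prefixes_alt data
instance (data : List (String × Int)) (out : List (String × Int)) : Decidable (Spec_filter_prefixes data out) := by unfold Spec_filter_prefixes; infer_instance

-- ===== CLAIM (what is proved, stated in full; the proofs are below) =====
def Claim_equal_filter_prefixes : Prop := ∀ (data : List (String × Int)), Dom_filter_prefixes data → Spec_filter_prefixes data (filter_prefixes data)

-- ===== LEMMAS AND PROOFS =====

-- a string is a proper prefix of another iff it is a take at some shorter length
theorem proper_prefix_iff (l₁ l₂ : List Char) :
    (l₁ ≠ l₂ ∧ l₁ <+: l₂) ↔ ∃ k : Nat, k < l₂.length ∧ l₁ = l₂.take k := by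
  constructor
  · rintro ⟨hne, hpre⟩
    refine ⟨l₁.length, ?_, (List.prefix_iff_eq_take.mp hpre)⟩
    rcases Nat.lt_or_ge l₁.length l₂.length with h | h
    · exact h
    · exact absurd (hpre.eq_of_length (Nat.le_antisymm hpre.length_le h)) hne
  · rintro ⟨k, hk, rfl⟩
    refine ⟨?_, List.take_prefix k l₂⟩
    intro h
    have : (l₂.take k).length = l₂.length := by rw [h]
    simp [Nat.min_eq_left (Nat.le_of_lt hk)] at this
    omega

theorem mem_fst_fold (c1 c2 : String → Bool) (l : List String)
    (st : PySem.Set String × PySem.Set String) (x : String) :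
    x ∈ (l.foldl
      (fun st w =>
        if c1 w then (PySem.Set.add st.1 w, st.2)
        else if !(c2 w) then (st.1, PySem.Set.add st.2 w) else st) st).1 ↔
    x ∈ st.1 ∨ (x ∈ l ∧ c1 x = true) := by
  induction l generalizing st with
  | nil => simp
  | cons hd tl ih =>
    simp only [List.foldl_cons, ih, List.mem_cons]
    by_cases h1 : c1 hd
    · simp only [h1, if_pos, PySem.Set.mem_add]
      constructor
      · rintro (⟨hs | rfl⟩ | h) <;> tauto
      · rintro (hs | ⟨(rfl | hm), hc⟩) <;> tauto
    · simp only [h1]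
      by_cases h2 : c2 hd <;> simp only [h2, if_pos] <;>
      · simp only [Bool.not_eq_true] at h1
        constructor
        · rintro (hs | h) <;> tauto
        · rintro (hs | ⟨(rfl | hm), hc⟩)
          · tauto
          · rw [hc] at h1; cases h1
          · tauto

theorem mem_snd_fold (c1 c2 : String → Bool) (l : List String)
    (st : PySem.Set String × PySem.Set String) (x : String) :
    x ∈ (l.foldl
      (fun st w =>
        if c1 w then (PySem.Set.add st.1 w, st.2)
        else if !(c2 w) then (st.1, PySem.Set.add st.2 w) else st) st).2 ↔
    x ∈ st.2 ∨ (x ∈ l ∧ c1 x = false ∧ c2 x = false) := by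
  induction l generalizing st with
  | nil => simp
  | cons hd tl ih =>
    simp only [List.foldl_cons, ih, List.mem_cons]
    by_cases h1 : c1 hd
    · simp only [h1, if_pos]
      constructor
      · rintro (hs | h) <;> tauto
      · rintro (hs | ⟨(rfl | hm), hc, hc2⟩)
        · tauto
        · rw [hc] at h1; cases h1
        · tauto
    · simp only [h1]
      by_cases h2 : c2 hd
      · simp only [h2, Bool.not_true]
        simp only [Bool.not_eq_true] at h1
        constructor
        · rintro (hs | h) <;> tauto
        · rintro (hs | ⟨(rfl | hm), hc, hc2⟩)
          · tauto
          · rw [hc2] at h2; cases h2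
          · tauto
      · simp only [h2, Bool.not_false, if_pos]
        simp only [Bool.false_eq_true, if_false, PySem.Set.mem_add]
        simp only [Bool.not_eq_true] at h1 h2
        constructor
        · rintro (⟨hs | rfl⟩ | h) <;> tauto
        · rintro (hs | ⟨(rfl | hm), hc, hc2⟩) <;> tauto

theorem slice_toList (u : String) (k : Int) (h : 0 ≤ k) :
    (PySem.Str.slice u none (some k)).toList = u.toList.take k.toNat := by
  simp [PySem.Str.slice, PySem.Chars.slice_eq_listSlice, PySem.List.slice_to _ h]

theorem startswith_iff' (s p : String) : PySem.Str.startswith s p = true ↔ p.toList <+: s.toList := by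
  simp [PySem.Chars.startswith_iff]

theorem len_int (s : String) : PySem.Str.len s = (s.toList.length : Int) := by simp

theorem mem_add_fold_if (c : Int → Prop) [DecidablePred c] (g : Int → String)
    (lens : List Int) (s : PySem.Set String) (x : String) :
    x ∈ lens.foldl (fun s k => if c k then PySem.Set.add s (g k) else s) s ↔
    x ∈ s ∨ ∃ k ∈ lens, c k ∧ x = g k := by
  induction lens generalizing s with
  | nil => simp
  | cons hd tl ih =>
    simp only [List.foldl_cons, ih, List.mem_cons]
    by_cases hc : c hd
    · simp only [hc, if_pos, PySem.Set.mem_add]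
      constructor
      · rintro (⟨hs | rfl⟩ | ⟨k, hk, h⟩)
        · exact Or.inl hs
        · exact Or.inr ⟨hd, Or.inl rfl, hc, rfl⟩
        · exact Or.inr ⟨k, Or.inr hk, h⟩
      · rintro (hs | ⟨k, (rfl | hk), h, rfl⟩)
        · exact Or.inl (Or.inl hs)
        · exact Or.inl (Or.inr rfl)
        · exact Or.inr ⟨k, hk, h, rfl⟩
    · simp only [hc, if_neg]
      constructor
      · rintro (hs | ⟨k, hk, h⟩)
        · exact Or.inl hs
        · exact Or.inr ⟨k, Or.inr hk, h⟩
      · rintro (hs | ⟨k, (rfl | hk), h, rfl⟩)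
        · exact Or.inl hs
        · exact absurd h hc
        · exact Or.inr ⟨k, hk, h, rfl⟩

theorem mem_pp_fold (lens : List Int) (c : String → Int → Prop) [∀ u k, Decidable (c u k)]
    (g : String → Int → String) (l : List String) (init : PySem.Set String) (x : String) :
    x ∈ l.foldl
      (fun s u => lens.foldl (fun s k => if c u k then PySem.Set.add s (g u k) else s) s) init ↔
    x ∈ init ∨ ∃ u ∈ l, ∃ k ∈ lens, c u k ∧ x = g u k := by
  induction l generalizing init with
  | nil => simp
  | cons hd tl ih =>
    simp only [List.foldl_cons, ih, mem_add_fold_if, List.mem_cons]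
    constructor
    · rintro (⟨hs | h⟩ | h)
      · exact Or.inl hs
      · exact Or.inr ⟨hd, Or.inl rfl, h⟩
      · rcases h with ⟨u, hm, h⟩; exact Or.inr ⟨u, Or.inr hm, h⟩
    · rintro (hs | ⟨u, (rfl | hm), h⟩)
      · exact Or.inl (Or.inl hs)
      · exact Or.inl (Or.inr h)
      · exact Or.inr ⟨u, hm, h⟩

-- "u ≠ w and u starts with w" = "w is u cut at some occurring word length k < len u"
theorem ex_slice_iff (words : List String) (lens : List Int)
    (hlens : ∀ k : Int, k ∈ lens ↔ ∃ v ∈ words, k = PySem.Str.len v)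
    (u w : String) (hw : w ∈ words) :
    (u ≠ w ∧ PySem.Str.startswith u w = true) ↔
    ∃ k ∈ lens, k < PySem.Str.len u ∧ w = PySem.Str.slice u none (some k) := by
  rw [startswith_iff']
  constructor
  · rintro ⟨hne, hpre⟩
    have hne' : w.toList ≠ u.toList := fun hc => hne (String.toList_inj.mp hc.symm)
    obtain ⟨k, hk, hwt⟩ := (proper_prefix_iff w.toList u.toList).mp ⟨hne', hpre⟩
    have hkl' : w.toList.length = k := by
      rw [hwt, List.length_take]; omega
    have hkw : (k : Int) = PySem.Str.len w := by
      rw [len_int, hkl']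
    refine ⟨(k : Int), (hlens _).mpr ⟨w, hw, hkw⟩, ?_, ?_⟩
    · rw [len_int]; exact_mod_cast hk
    · apply String.toList_inj.mp
      rw [slice_toList u k (Int.natCast_nonneg k), Int.toNat_natCast]
      exact hwt
  · rintro ⟨k, hkmem, hkl, rfl⟩
    have hk0 : 0 ≤ k := by
      obtain ⟨v, _, rfl⟩ := (hlens k).mp hkmem
      rw [len_int]; exact Int.natCast_nonneg _
    rw [len_int] at hkl
    have hlt : k.toNat < u.toList.length := by omega
    have hts : (PySem.Str.slice u none (some k)).toList = u.toList.take k.toNat := slice_toList u k hk0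
    constructor
    · intro hc
      have h2 := congrArg String.toList hc
      rw [hts] at h2
      have hlen := congrArg List.length h2
      rw [List.length_take, Nat.min_eq_left (Nat.le_of_lt hlt)] at hlen
      omega
    · rw [hts]; exact List.take_prefix _ _

theorem c1_iff (words : List String) (lens : List Int)
    (hlens : ∀ k : Int, k ∈ lens ↔ ∃ v ∈ words, k = PySem.Str.len v)
    (w : String) (hw : w ∈ words) :
    (words.any (fun other => other != w && PySem.Str.startswith other w) = true) ↔
    ∃ u ∈ words, ∃ k ∈ lens, k < PySem.Str.len u ∧ w = PySem.Str.slice u none (some k) := by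
  simp only [List.any_eq_true, Bool.and_eq_true, bne_iff_ne]
  constructor
  · rintro ⟨u, hu, h⟩
    exact ⟨u, hu, (ex_slice_iff words lens hlens u w hw).mp h⟩
  · rintro ⟨u, hu, h⟩
    exact ⟨u, hu, (ex_slice_iff words lens hlens u w hw).mpr h⟩

theorem c2_true_iff (words : List String) (lens : List Int)
    (hlens : ∀ k : Int, k ∈ lens ↔ ∃ v ∈ words, k = PySem.Str.len v)
    (w : String) :
    (words.any (fun other => other != w && PySem.Str.startswith w other) = true) ↔
    ∃ k ∈ lens, k < PySem.Str.len w ∧ PySem.Str.slice w none (some k) ∈ words := by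
  simp only [List.any_eq_true, Bool.and_eq_true, bne_iff_ne]
  constructor
  · rintro ⟨u, hu, hne, hsw⟩
    obtain ⟨k, hk, hkl, rfl⟩ := (ex_slice_iff words lens hlens w u hu).mp ⟨Ne.symm hne, hsw⟩
    exact ⟨k, hk, hkl, hu⟩
  · rintro ⟨k, hk, hkl, hmem⟩
    have h := (ex_slice_iff words lens hlens w _ hmem).mpr ⟨k, hk, hkl, rfl⟩
    exact ⟨_, hmem, Ne.symm h.1, h.2⟩

theorem contains_false_iff (s : PySem.Set String) (x : String) :
    PySem.Set.contains s x = false ↔ x ∉ s := by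
  rw [Bool.eq_false_iff, Ne, PySem.Set.contains_iff]

-- the two filter predicates agree on every word of the list
theorem pred_eq (words : List String) (w : String) (hw : w ∈ words) :
    (PySem.Set.contains
        (words.foldl
          (fun (st : PySem.Set String × PySem.Set String) word =>
            if words.any (fun other => other != word && PySem.Str.startswith other word) then
              (PySem.Set.add st.1 word, st.2)
            else if !(words.any (fun other => other != word && PySem.Str.startswith word other)) then
              (st.1, PySem.Set.add st.2 word)
            else st)
          (PySem.Set.empty, PySem.Set.empty)).1 w ||
      PySem.Set.contains
        (words.foldl
          (fun (st : PySem.Set String × PySem.Set String) word =>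
            if words.any (fun other => other != word && PySem.Str.startswith other word) then
              (PySem.Set.add st.1 word, st.2)
            else if !(words.any (fun other => other != word && PySem.Str.startswith word other)) then
              (st.1, PySem.Set.add st.2 word)
            else st)
          (PySem.Set.empty, PySem.Set.empty)).2 w)
    =
    (PySem.Set.contains
        ((PySem.Set.ofList words).foldl
          (fun s u =>
            ((PySem.Set.ofList words).foldl
                (fun s u => PySem.Set.add s (PySem.Str.len u)) PySem.Set.empty).foldl
              (fun s k =>
                if k < PySem.Str.len u then PySem.Set.add s (PySem.Str.slice u none (some k))
                else s)
              s)
          PySem.Set.empty) w ||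
      ((PySem.Set.ofList words).foldl
          (fun s u => PySem.Set.add s (PySem.Str.len u)) PySem.Set.empty).all
        (fun k =>
          !(decide (k < PySem.Str.len w)) ||
          !(PySem.Set.contains (PySem.Set.ofList words) (PySem.Str.slice w none (some k))))) := by
  have hlens : ∀ k : Int,
      (k ∈ (PySem.Set.ofList words).foldl
          (fun s u => PySem.Set.add s (PySem.Str.len u)) PySem.Set.empty) ↔
      ∃ v ∈ words, k = PySem.Str.len v := by
    intro k
    rw [PySem.Set.mem_foldl_add]
    simp [PySem.Set.mem_ofList]
  rw [Bool.eq_iff_iff]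
  simp only [Bool.or_eq_true, PySem.Set.contains_iff]
  rw [mem_fst_fold, mem_snd_fold]
  rw [mem_pp_fold]
  simp only [PySem.Set.mem_ofList, List.all_eq_true, Bool.or_eq_true,
    Bool.not_eq_true', contains_false_iff, decide_eq_false_iff_not, hw, true_and]
  rw [← c1_iff words _ hlens w hw]
  have h2' : (∀ k ∈ (PySem.Set.ofList words).foldl
        (fun s u => PySem.Set.add s (PySem.Str.len u)) PySem.Set.empty,
        ¬ k < PySem.Str.len w ∨ PySem.Str.slice w none (some k) ∉ words) ↔
      (words.any (fun other => other != w && PySem.Str.startswith w other) = false) := by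
    rw [Bool.eq_false_iff, Ne, c2_true_iff words _ hlens w]
    constructor
    · rintro h ⟨k, hk, hlt, hmem⟩
      rcases h k hk with h' | h'
      · exact h' hlt
      · exact h' hmem
    · intro h k hk
      by_cases hlt : k < PySem.Str.len w
      · exact Or.inr fun hmem => h ⟨k, hk, hlt, hmem⟩
      · exact Or.inl hlt
  rw [h2']
  by_cases hc1 : words.any (fun other => other != w && PySem.Str.startswith other w) = true <;>
    by_cases hc2 : words.any (fun other => other != w && PySem.Str.startswith w other) = true <;>
      simp_all

-- ===== VERDICT (by name: the statement is the Claim_ definition above) =====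
theorem filter_prefixes_spec : Claim_equal_filter_prefixes := by
  intro data _
  unfold Spec_filter_prefixes filter_prefixes filter_prefixes_alt
  simp only
  apply List.filter_congr
  intro item hitem
  exact pred_eq (data.map (fun item => item.1)) item.1 (List.mem_map_of_mem hitem)
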